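-- pv_equiv track=rewrite | github.com/Thajunniza/leetcode | math/1952_Three_Divisors.py | isThree_sqrt
-- ===== SOURCE A (Python) =====
-- def isThree_sqrt(n):
--     """
--     :type n: int
--     :rtype: bool
--     """
--     count = 0
--     i = 1
--     while (i * i) <= n:
--         if n % i == 0:
--             if i * i == n:
--                 # i is the square root, count it once
--                 count += 1
--             else:
--                 # Count both i and n//i
--                 count += 2
--
--         # Early termination if count exceeds 3
--         if count > 3:
--             return False
--         i += 1
--
--     return count == 3
-- ===== SOURCE B (Python) =====
-- def isThree_sqrt(n):
--     # Stage 1: integer square root by counting up.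
--     r = 0
--     while (r + 1) * (r + 1) <= n:
--         r += 1
--     # n must be a perfect square r*r with r >= 2 ...
--     if r * r != n or r < 2:
--         return False
--     # ... and r must be prime: no divisor j with 2 <= j, j*j <= r.
--     j = 2
--     while j * j <= r:
--         if r % j == 0:
--             return False
--         j += 1
--     return True
-- ===== Notes on version B (the rewrite author's own statement) =====
-- stated objective: alternative
-- what changed: Instead of counting divisor pairs with an early-exit counter in one loop, B runs two stages: it computes the integer square root r of n by counting up, rejects unless n is a perfect square with a nontrivial root, and then trial-divides r to test that r is prime; n has exactly three divisors iff it is the square of a prime.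
import Mathlib
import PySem

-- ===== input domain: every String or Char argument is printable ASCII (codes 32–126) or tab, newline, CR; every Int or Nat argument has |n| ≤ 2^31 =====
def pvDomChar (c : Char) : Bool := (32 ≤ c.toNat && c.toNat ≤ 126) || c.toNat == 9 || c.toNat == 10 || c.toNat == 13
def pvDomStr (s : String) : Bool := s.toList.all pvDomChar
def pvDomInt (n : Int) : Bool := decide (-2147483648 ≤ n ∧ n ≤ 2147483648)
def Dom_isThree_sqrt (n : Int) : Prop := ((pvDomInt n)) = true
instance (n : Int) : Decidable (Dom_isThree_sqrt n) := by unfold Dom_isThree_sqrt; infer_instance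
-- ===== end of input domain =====

-- B replaces A's divisor-pair counting loop by a two-stage test: compute r = isqrt(n)
-- by counting up, then accept iff n = r*r with r >= 2 and r is prime (trial division
-- up to sqrt(r)); objective: alternative algorithm, same asymptotic cost.

-- termination helper for loops bounded by i*i <= n
theorem pvSqLoopDec (n i : Int) (h : i * i ≤ n) : (n + 1 - (i + 1)).toNat < (n + 1 - i).toNat := by
  have hii : i ≤ i * i := by nlinarith [sq_nonneg (i - 1)]
  omega

-- ===== PORT A =====
def isThree_sqrt_loop (n i count : Int) : Bool :=
  if _h : i * i ≤ n then
    let count' := if PySem.Int.mod n i == 0 then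
                    (if i * i == n then count + 1 else count + 2)
                  else count
    if count' > 3 then false else isThree_sqrt_loop n (i + 1) count'
  else count == 3
termination_by (n + 1 - i).toNat
decreasing_by exact pvSqLoopDec n i _h

def isThree_sqrt (n : Int) : Bool := isThree_sqrt_loop n 1 0

-- ===== PORT B =====
-- termination helper for the isqrt counting loop
theorem pvSqrtLoopDec (n r : Int) (h : (r + 1) * (r + 1) ≤ n) : (n - (r + 1)).toNat < (n - r).toNat := by
  have h1 : 0 < r * r + r + 1 := by nlinarith [sq_nonneg (2 * r + 1)]
  have h2 : r < n := by nlinarith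
  omega

def pvSqrtLoop (n r : Int) : Int :=
  if _h : (r + 1) * (r + 1) ≤ n then pvSqrtLoop n (r + 1) else r
termination_by (n - r).toNat
decreasing_by exact pvSqrtLoopDec n r _h

def pvNoDivLoop (r j : Int) : Bool :=
  if _h : j * j ≤ r then
    if PySem.Int.mod r j == 0 then false else pvNoDivLoop r (j + 1)
  else true
termination_by (r + 1 - j).toNat
decreasing_by exact pvSqLoopDec r j _h

def isThree_sqrt_alt (n : Int) : Bool :=
  let r := pvSqrtLoop n 0
  if r * r ≠ n ∨ r < 2 then false
  else pvNoDivLoop r 2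

-- ===== PRECONDITION & SPEC =====
def Spec_isThree_sqrt (n : Int) (out : Bool) : Prop := out = isThree_sqrt_alt n
instance (n : Int) (out : Bool) : Decidable (Spec_isThree_sqrt n out) := by unfold Spec_isThree_sqrt; infer_instance

-- ===== CLAIM =====
def Claim_equal_isThree_sqrt : Prop := ∀ (n : Int), Dom_isThree_sqrt n → Spec_isThree_sqrt n (isThree_sqrt n)

-- ===== LEMMAS AND PROOFS =====

-- T n i = total contribution (1 for the square root, 2 for any other divisor pair)
-- of the divisors d of n with i ≤ d and d*d ≤ n; same recursion shape as A's loop.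
def pvT (n i : Int) : Int :=
  if _h : i * i ≤ n then
    (if PySem.Int.mod n i == 0 then (if i * i == n then 1 else 2) else 0) + pvT n (i + 1)
  else 0
termination_by (n + 1 - i).toNat
decreasing_by exact pvSqLoopDec n i _h

theorem pvT_nonneg (n i : Int) : 0 ≤ pvT n i := by
  induction i using pvT.induct (n := n) with
  | case1 i h ih =>
    rw [pvT, dif_pos h]
    have : (0:Int) ≤ if PySem.Int.mod n i == 0 then (if i * i == n then 1 else 2) else 0 := by
      split
      · split
        · omega
        · omega
      · omega
    omega
  | case2 i h => rw [pvT]; simp [h]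

theorem pvT_zero_of_gt (n d : Int) (h : ¬ d * d ≤ n) : pvT n d = 0 := by
  rw [pvT]; simp [h]

theorem isThree_sqrt_loop_eq (n i count : Int) (h0 : 0 ≤ count) (h3 : count ≤ 3) :
    isThree_sqrt_loop n i count = decide (count + pvT n i = 3) := by
  induction i using pvT.induct (n := n) generalizing count with
  | case1 i h ih =>
    rw [isThree_sqrt_loop, pvT, dif_pos h, dif_pos h]
    have hT := pvT_nonneg n (i + 1)
    simp only []
    by_cases hm : (PySem.Int.mod n i == 0) = true
    · rw [if_pos hm, if_pos hm]
      by_cases hs : (i * i == n) = true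
      · rw [if_pos hs, if_pos hs]
        by_cases hc : count + 1 > 3
        · rw [if_pos hc]; symm
          simp only [decide_eq_false_iff_not]; omega
        · rw [if_neg hc, ih (count + 1) (by omega) (by omega)]
          simp only [decide_eq_decide]; omega
      · rw [if_neg hs, if_neg hs]
        by_cases hc : count + 2 > 3
        · rw [if_pos hc]; symm
          simp only [decide_eq_false_iff_not]; omega
        · rw [if_neg hc, ih (count + 2) (by omega) (by omega)]
          simp only [decide_eq_decide]; omega
    · rw [if_neg hm, if_neg hm, if_neg (by omega : ¬ count > 3),
          ih count h0 h3]
      simp only [decide_eq_decide]; omega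
  | case2 i h =>
    rw [isThree_sqrt_loop, pvT, dif_neg h, dif_neg h, add_zero]
    by_cases hc : count = 3
    · simp [hc]
    · simp [hc]

theorem pv_mod_one (n : Int) : PySem.Int.mod n 1 = 0 := by
  rw [PySem.Int.mod_eq_emod_of_pos (by omega : (0:Int) < 1)]
  exact Int.emod_one n

-- the isqrt counting loop computes the floor square root
theorem pvSqrtLoop_spec (n r : Int) (h0 : 0 ≤ r) (h1 : r * r ≤ n) :
    0 ≤ pvSqrtLoop n r ∧ pvSqrtLoop n r * pvSqrtLoop n r ≤ n ∧
      n < (pvSqrtLoop n r + 1) * (pvSqrtLoop n r + 1) := by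
  induction r using pvSqrtLoop.induct (n := n) with
  | case1 r h ih =>
    rw [pvSqrtLoop, dif_pos h]
    exact ih (by omega) h
  | case2 r h =>
    rw [pvSqrtLoop, dif_neg h]
    exact ⟨h0, h1, by omega⟩

-- the trial-division loop returns true iff r has no divisor j with i ≤ j, j*j ≤ r
theorem pvNoDivLoop_spec (r : Int) :
    ∀ i, 0 ≤ i → (pvNoDivLoop r i = true ↔ ∀ k, i ≤ k → k * k ≤ r → ¬ (k ∣ r)) := by
  intro i
  induction i using pvT.induct (n := r) with
  | case1 i h ih =>
    intro h0
    rw [pvNoDivLoop, dif_pos h]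
    by_cases hm : (PySem.Int.mod r i == 0) = true
    · rw [if_pos hm]
      constructor
      · intro hfalse; simp at hfalse
      · intro hk
        exact absurd ((PySem.Int.mod_eq_zero_iff_dvd r i).1 (by simpa using hm))
          (hk i le_rfl h)
    · rw [if_neg hm, ih (by omega)]
      constructor
      · intro hk k hik hkr
        rcases eq_or_lt_of_le hik with rfl | hlt
        · intro hdvd
          exact hm (by simp [(PySem.Int.mod_eq_zero_iff_dvd r i).2 hdvd])
        · exact hk k (by omega) hkr
      · intro hk k hik hkr
        exact hk k (by omega) hkr
  | case2 i h =>
    intro h0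
    rw [pvNoDivLoop, dif_neg h]
    simp only [true_iff]
    intro k hik hkr hdvd
    have : i * i ≤ k * k := by nlinarith
    omega

-- if n has no square root among d ≥ 2, pvT n i is even for i ≥ 2
theorem pvT_even (n : Int) (hsq : ∀ d, 2 ≤ d → d * d ≠ n) :
    ∀ i, 2 ≤ i → pvT n i % 2 = 0 := by
  intro i
  induction i using pvT.induct (n := n) with
  | case1 i h ih =>
    intro hi
    rw [pvT, dif_pos h]
    have h2 := ih (by omega)
    by_cases hm : (PySem.Int.mod n i == 0) = true
    · have hne : ¬ ((i * i == n) = true) := by simpa using hsq i hi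
      rw [if_pos hm, if_neg hne]
      omega
    · rw [if_neg hm]
      omega
  | case2 i h =>
    intro _
    rw [pvT, dif_neg h]
    norm_num

-- a lower bound on pvT from one known divisor position j ≥ i
theorem pvT_ge (n i j : Int) (h0 : 0 ≤ i) (hij : i ≤ j) (hj : j * j ≤ n) :
    (if PySem.Int.mod n j == 0 then (if j * j == n then 1 else 2) else 0) + pvT n (j + 1)
      ≤ pvT n i := by
  induction i using pvT.induct (n := n) with
  | case1 i h ih =>
    rcases eq_or_lt_of_le hij with rfl | hlt
    · conv_rhs => rw [pvT]
      rw [dif_pos h]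
    · have hstep := ih (by omega) (by omega)
      conv_rhs => rw [pvT]
      rw [dif_pos h]
      have : (0:Int) ≤ if PySem.Int.mod n i == 0 then (if i * i == n then 1 else 2) else 0 := by
        split
        · split
          · omega
          · omega
        · omega
      omega
  | case2 i h =>
    exfalso
    have : i * i ≤ j * j := by nlinarith
    omega

-- prime square root ⇒ every counted divisor position d equals r
theorem pv_unique_div (n r : Int) (hr : 2 ≤ r) (hn : r * r = n)
    (hnd : ∀ k, 2 ≤ k → k * k ≤ r → ¬ (k ∣ r)) :
    ∀ d, 2 ≤ d → d * d ≤ n → (d ∣ n) → d = r := by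
  intro d hd2 hdn hdvd
  set p := r.natAbs with hpdef
  have hpr : (p : Int) = r := Int.natAbs_of_nonneg (by omega)
  have hp2 : 2 ≤ p := by omega
  have hprime : Nat.Prime p := by
    rw [Nat.prime_def_lt]
    refine ⟨hp2, fun m hmp hmdvd => ?_⟩
    by_contra hm1
    have hm2 : 2 ≤ m := by
      rcases Nat.eq_zero_or_pos m with h0 | h0
      · subst h0; simp at hmdvd; omega
      · omega
    obtain ⟨q, hpq⟩ := hmdvd
    have hmdvd : m ∣ p := ⟨q, hpq⟩
    have hqdvd : q ∣ p := ⟨m, by rw [hpq, Nat.mul_comm]⟩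
    have hq2 : 2 ≤ q := by
      by_contra h0
      have hq01 : q = 0 ∨ q = 1 := by omega
      rcases hq01 with h01 | h01 <;> subst h01 <;> simp at hpq <;> omega
    by_cases hms : m * m ≤ p
    · refine hnd (m : Int) (by exact_mod_cast hm2) ?_ ?_
      · rw [← hpr]; exact_mod_cast hms
      · rw [← hpr]; exact_mod_cast hmdvd
    · have hms' : p < m * m := by omega
      have hlt : q ≤ m := by nlinarith
      have hqs : q * q ≤ p := by nlinarith
      refine hnd ((q : Nat) : Int) (by exact_mod_cast hq2) ?_ ?_
      · rw [← hpr]; exact_mod_cast hqs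
      · rw [← hpr]; exact_mod_cast hqdvd
  have h1 : d.natAbs ∣ n.natAbs := Int.natAbs_dvd_natAbs.2 hdvd
  rw [show n.natAbs = p ^ 2 by rw [pow_two, ← Int.natAbs_mul, hn]] at h1
  obtain ⟨m, hm2, hdm⟩ := (Nat.dvd_prime_pow hprime).1 h1
  have hdabs : (d.natAbs : Int) = d := Int.natAbs_of_nonneg (by omega)
  interval_cases m
  · simp at hdm; omega
  · rw [pow_one] at hdm; omega
  · rw [pow_two] at hdm
    have hdn2 : d = n := by
      have hc : (d.natAbs : Int) = (p : Int) * p := by exact_mod_cast hdm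
      rw [hdabs, hpr] at hc
      omega
    nlinarith

-- all counted divisor positions equal r ⇒ pvT n i = 1 for 2 ≤ i ≤ r
theorem pvT_eq_one (n r : Int) (hr : 2 ≤ r) (hn : r * r = n)
    (hd : ∀ d, 2 ≤ d → d * d ≤ n → (d ∣ n) → d = r) :
    ∀ i, 2 ≤ i → pvT n i = (if i ≤ r then 1 else 0) := by
  intro i
  induction i using pvT.induct (n := n) with
  | case1 i h ih =>
    intro hi
    have hir : i ≤ r := by nlinarith
    rw [pvT, dif_pos h, if_pos hir]
    by_cases hm : (PySem.Int.mod n i == 0) = true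
    · have hdvd : i ∣ n := (PySem.Int.mod_eq_zero_iff_dvd n i).1 (by simpa using hm)
      have hieq : i = r := hd i hi h hdvd
      subst hieq
      rw [if_pos hm, if_pos (by simpa using hn), ih (by omega), if_neg (by omega)]
      norm_num
    · rw [if_neg hm]
      have hine : i ≠ r := by
        intro hieq
        subst hieq
        exact hm (by simp [(PySem.Int.mod_eq_zero_iff_dvd n i).2 ⟨i, hn.symm⟩])
      rw [ih (by omega), if_pos (by omega)]
      omega
  | case2 i h =>
    intro hi
    rw [pvT, dif_neg h, if_neg (by nlinarith)]

-- evaluate pvSqrtLoop on the two tiny bases needed in the final case split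
theorem pvSqrtLoop_zero_of_lt_one (n : Int) (h : n < 1) : pvSqrtLoop n 0 = 0 := by
  rw [pvSqrtLoop, dif_neg (show ¬ ((0:Int) + 1) * (0 + 1) ≤ n by omega)]

theorem pvSqrtLoop_one : pvSqrtLoop 1 0 = 1 := by
  rw [pvSqrtLoop]
  simp only [show ((0:Int) + 1) * (0 + 1) ≤ 1 by norm_num, dif_pos]
  rw [pvSqrtLoop]
  norm_num

-- ===== VERDICT =====
theorem isThree_sqrt_spec : Claim_equal_isThree_sqrt := by
  intro n _
  show isThree_sqrt n = isThree_sqrt_alt n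
  rw [isThree_sqrt, isThree_sqrt_alt,
      isThree_sqrt_loop_eq n 1 0 (by omega) (by omega)]
  by_cases hn2 : 2 ≤ n
  · -- main case: n ≥ 2; A = decide (pvT n 2 = 1)
    have h11 : (1:Int) * 1 ≤ n := by omega
    have hA : (0:Int) + pvT n 1 = 2 + pvT n 2 := by
      rw [pvT, dif_pos h11,
          if_pos (by rw [pv_mod_one]; rfl),
          if_neg (by simp; omega)]
      norm_num
    rw [hA]
    obtain ⟨hr0, hr1, hr2⟩ := pvSqrtLoop_spec n 0 (by omega) (by omega)
    set r := pvSqrtLoop n 0 with hrdef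
    by_cases hsq : r * r = n
    · have hr2' : 2 ≤ r := by nlinarith
      rw [if_neg (by omega)]
      by_cases hnd : pvNoDivLoop r 2 = true
      · -- r prime: pvT n 2 = 1
        have hd := pv_unique_div n r hr2' hsq
          (fun k hk hkr => (pvNoDivLoop_spec r 2 (by omega)).1 hnd k hk hkr)
        rw [pvT_eq_one n r hr2' hsq hd 2 (by omega), if_pos hr2', hnd]
        simp
      · -- r composite: pvT n 2 ≥ 3
        have hfalse : pvNoDivLoop r 2 = false := by
          cases h : pvNoDivLoop r 2
          · rfl
          · exact absurd h hnd
        obtain ⟨j, hij, hjr, hjd⟩ : ∃ k, 2 ≤ k ∧ k * k ≤ r ∧ (k ∣ r) := by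
          have := (pvNoDivLoop_spec r 2 (by omega)).not.1 (by simp [hfalse])
          simp only [not_forall] at this
          obtain ⟨k, hk1, hk2, hk3⟩ := this
          exact ⟨k, hk1, hk2, not_not.1 (by simpa using hk3)⟩
        have hrn : r < n := by nlinarith
        have hjn : j * j ≤ n := by omega
        have hjdn : j ∣ n := hjd.trans ⟨r, hsq.symm⟩
        have hjlt : j + 1 ≤ r := by nlinarith
        have h1 := pvT_ge n 2 j (by omega) hij hjn
        rw [if_pos (show (PySem.Int.mod n j == 0) = true by
              simp [(PySem.Int.mod_eq_zero_iff_dvd n j).2 hjdn]),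
            if_neg (show ¬ ((j * j == n) = true) by simp; omega)] at h1
        have h2 := pvT_ge n (j + 1) r (by omega) hjlt (by omega)
        rw [if_pos (show (PySem.Int.mod n r == 0) = true by
              simp [(PySem.Int.mod_eq_zero_iff_dvd n r).2 ⟨r, hsq.symm⟩]),
            if_pos (show (r * r == n) = true by simpa using hsq)] at h2
        have h3 := pvT_nonneg n (r + 1)
        rw [hfalse]
        simp only [decide_eq_false_iff_not]
        omega
    · -- n not a perfect square: both sides false
      rw [if_pos (Or.inl hsq)]
      have hsq' : ∀ d, 2 ≤ d → d * d ≠ n := by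
        intro d hd hdn
        have hdr : d ≤ r := by nlinarith
        have hrd : r ≤ d := by nlinarith
        have hdeq : d = r := le_antisymm hdr hrd
        exact hsq (hdeq ▸ hdn)
      have := pvT_even n hsq' 2 (by omega)
      simp only [decide_eq_false_iff_not]
      omega
  · -- n ≤ 1: both sides false
    by_cases hn1 : n = 1
    · subst hn1
      rw [pvSqrtLoop_one]
      rw [if_pos (by norm_num)]
      have hA : (0:Int) + pvT 1 1 = 1 := by
        rw [pvT, dif_pos (by norm_num),
            if_pos (by rw [pv_mod_one]; rfl),
            if_pos (by norm_num),
            pvT_zero_of_gt 1 (1 + 1) (by norm_num)]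
        norm_num
      rw [hA]
      simp
    · -- n ≤ 0
      rw [pvSqrtLoop_zero_of_lt_one n (by omega)]
      rw [if_pos (by omega)]
      have hA : pvT n 1 = 0 := pvT_zero_of_gt n 1 (by omega)
      rw [hA]
      simp
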